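-- pv_equiv track=rewrite | github.com/dime-worldbank/mega-boost | Moldova/_onboarding/scripts/9_build_verification_doc.py | build_signoff_section
-- ===== SOURCE A (Python) =====
-- from collections import defaultdict
--
-- def build_signoff_section(pairs, rows):
--     lines = []
--     lines.append("## C. Sign-off checklist")
--     lines.append("")
--     lines.append(
--         "One checkbox per item. Tick _Accept_ if the proposed fix should be "
--         "applied to the workbook; tick _Reject_ with a note if the current "
--         "behaviour is correct as-is."
--     )
--     lines.append("")
--     lines.append("### A. Overcounting")
--     lines.append("")
--     idx = 0
--     for rng in ["2006-2015", "2016-2019", "2020-2024"]: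
--         for (a, b, r), _ in sorted(pairs.items()):
--             if r != rng:
--                 continue
--             idx += 1
--             lines.append(f"- [ ] **A{idx}** `{a}` × `{b}` ({rng}) — accept fix / reject (note: _______)")
--     lines.append("")
--     lines.append("### B. Hard-coded overrides")
--     lines.append("")
--     by_code = defaultdict(int)
--     for r in rows:
--         by_code[r["code"]] += 1
--     idx = 0
--     for code, count in sorted(by_code.items()):
--         idx += 1
--         lines.append(f"- [ ] **B{idx}** `{code}` ({count} cells) — SME to supply formulas / accept literals")
--     lines.append("")
--     lines.append("### Final")
--     lines.append("")
--     lines.append("- [ ] Reviewer: __________________________")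
--     lines.append("- [ ] Date: __________________________")
--     lines.append(
--         "- [ ] Workbook updated; rerun `python3 _onboarding/scripts/6_detect_overlaps.py` "
--         "and `python3 _onboarding/scripts/9_build_verification_doc.py` to "
--         "confirm resolved items drop out."
--     )
--     return lines
-- ===== SOURCE B (Python) =====
-- from collections import Counter, defaultdict
--
-- RANGES = ["2006-2015", "2016-2019", "2020-2024"]
--
-- HEADER = [
--     "## C. Sign-off checklist",
--     "",
--     "One checkbox per item. Tick _Accept_ if the proposed fix should be "
--     "applied to the workbook; tick _Reject_ with a note if the current "
--     "behaviour is correct as-is.",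
--     "",
--     "### A. Overcounting",
--     "",
-- ]
--
-- FOOTER = [
--     "",
--     "### Final",
--     "",
--     "- [ ] Reviewer: __________________________",
--     "- [ ] Date: __________________________",
--     "- [ ] Workbook updated; rerun `python3 _onboarding/scripts/6_detect_overlaps.py` "
--     "and `python3 _onboarding/scripts/9_build_verification_doc.py` to "
--     "confirm resolved items drop out.",
-- ]
--
--
-- def build_signoff_section(pairs, rows):
--     # Sort the pair map ONCE, bucket entries by range, then walk the three
--     # ranges in order with a single global enumeration.
--     items = sorted(pairs.items())
--     kv = [(r, (a, b)) for (a, b, r), _ in items]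
--     groups = defaultdict(list)
--     for r, ab in kv:
--         groups[r].append(ab)
--     entries = [(a, b, rng) for rng in RANGES for a, b in groups[rng]]
--     sec_a = [
--         f"- [ ] **A{i}** `{a}` × `{b}` ({rng}) — accept fix / reject (note: _______)"
--         for i, (a, b, rng) in enumerate(entries, 1)
--     ]
--     counts = sorted(Counter(r["code"] for r in rows).items())
--     sec_b = [
--         f"- [ ] **B{i}** `{code}` ({count} cells) — SME to supply formulas / accept literals"
--         for i, (code, count) in enumerate(counts, 1)
--     ]
--     return (HEADER + sec_a + ["", "### B. Hard-coded overrides", ""] + sec_b + FOOTER)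
-- ===== Notes on version B (the rewrite author's own statement) =====
-- stated objective: simpler
-- what changed: One sort plus a range->entries bucket dict and a single global enumeration over the concatenated buckets replaces A's three filtered re-scans of the sorted map with hand-threaded counters; the B section uses Counter and enumerate instead of a manual defaultdict/idx loop.
import Mathlib
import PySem

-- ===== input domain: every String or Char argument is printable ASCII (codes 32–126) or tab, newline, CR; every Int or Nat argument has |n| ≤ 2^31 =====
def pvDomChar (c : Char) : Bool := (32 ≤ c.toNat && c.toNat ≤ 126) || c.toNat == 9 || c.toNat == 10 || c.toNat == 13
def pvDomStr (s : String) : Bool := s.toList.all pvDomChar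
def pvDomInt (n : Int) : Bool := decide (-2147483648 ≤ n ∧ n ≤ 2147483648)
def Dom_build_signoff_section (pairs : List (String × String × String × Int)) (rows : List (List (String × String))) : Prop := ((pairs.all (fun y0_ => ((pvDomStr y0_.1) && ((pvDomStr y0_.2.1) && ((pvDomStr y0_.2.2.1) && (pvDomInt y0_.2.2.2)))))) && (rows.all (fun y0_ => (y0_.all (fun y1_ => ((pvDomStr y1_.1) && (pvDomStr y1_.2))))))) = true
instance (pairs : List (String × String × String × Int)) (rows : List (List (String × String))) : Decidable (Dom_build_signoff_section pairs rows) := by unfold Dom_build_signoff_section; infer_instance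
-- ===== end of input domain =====

-- B replaces A's three filtered re-scans of the sorted pair map (each with a hand-threaded
-- counter) by one sort, a range->entries bucket dict and a single global enumeration; the
-- B-section uses Counter + enumerate. Same output; objective: simpler.


-- ===== PORT A =====
-- Shared by both ports (both Pythons execute the identical line `sorted(pairs.items())`):
-- Python's `<` on the item tuples ((a, b, r), v), lexicographic.
def pvTupLt (p q : (String × String × String) × Int) : Bool :=
  decide (p.1.1 < q.1.1) || (p.1.1 == q.1.1 &&
    (decide (p.1.2.1 < q.1.2.1) || (p.1.2.1 == q.1.2.1 &&
      (decide (p.1.2.2 < q.1.2.2) || (p.1.2.2 == q.1.2.2 && decide (p.2 < q.2))))))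

-- `sorted(pairs.items())`: the argument dict, then Python's stable sort (insertion via insertBy,
-- the shape of PySem.List.sorted_eq_foldl_insertBy, with the explicit tuple comparison above).
def pvSortedItems (pairs : List (String × String × String × Int)) :
    List ((String × String × String) × Int) :=
  ((PySem.Dict.ofList (pairs.map (fun p => ((p.1, p.2.1, p.2.2.1), p.2.2.2)))).items).foldl
    (fun acc x => PySem.List.insertBy pvTupLt x acc) []

-- A's B-section loop body: by_code[r["code"]] += 1 (r["code"] = first-match lookup; KeyError = none,
-- excluded by Pre_ below, where the skip branch is never reached).
def pvBumpCode (d : PySem.Dict String Int) (r : List (String × String)) : PySem.Dict String Int :=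
  match (PySem.Dict.mk r).get? "code" with
  | some c => d.modify c (0 : Int) (· + 1)
  | none => d

def build_signoff_section (pairs : List (String × String × String × Int)) (rows : List (List (String × String))) : List String :=
  let lines0 : List String :=
    ["## C. Sign-off checklist", "",
     "One checkbox per item. Tick _Accept_ if the proposed fix should be applied to the workbook; tick _Reject_ with a note if the current behaviour is correct as-is.",
     "", "### A. Overcounting", ""]
  let items := pvSortedItems pairs
  let stA : Int × List String :=
    (["2006-2015", "2016-2019", "2020-2024"]).foldl
      (fun st rng => items.foldl
        (fun st it => if it.1.2.2 ≠ rng then st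
          else (st.1 + 1, st.2 ++ ["- [ ] **A" ++ PySem.Int.toStr (st.1 + 1) ++ "** `" ++ it.1.1 ++ "` × `" ++ it.1.2.1 ++ "` (" ++ rng ++ ") — accept fix / reject (note: _______)"])) st)
      ((0 : Int), lines0)
  let lines1 := stA.2 ++ ["", "### B. Hard-coded overrides", ""]
  let by_code : PySem.Dict String Int := rows.foldl pvBumpCode PySem.Dict.empty
  let stB : Int × List String :=
    (PySem.List.sorted2 by_code.items (fun p => p.1) (fun p => p.2)).foldl
      (fun st p => (st.1 + 1, st.2 ++ ["- [ ] **B" ++ PySem.Int.toStr (st.1 + 1) ++ "** `" ++ p.1 ++ "` (" ++ PySem.Int.toStr p.2 ++ " cells) — SME to supply formulas / accept literals"])) ((0 : Int), lines1)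
  stB.2 ++
    ["", "### Final", "",
     "- [ ] Reviewer: __________________________",
     "- [ ] Date: __________________________",
     "- [ ] Workbook updated; rerun `python3 _onboarding/scripts/6_detect_overlaps.py` and `python3 _onboarding/scripts/9_build_verification_doc.py` to confirm resolved items drop out."]

-- ===== PORT B =====
def pvHeader : List String :=
  ["## C. Sign-off checklist", "",
   "One checkbox per item. Tick _Accept_ if the proposed fix should be applied to the workbook; tick _Reject_ with a note if the current behaviour is correct as-is.",
   "", "### A. Overcounting", ""]

def pvFooter : List String :=
  ["", "### Final", "",
   "- [ ] Reviewer: __________________________",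
   "- [ ] Date: __________________________",
   "- [ ] Workbook updated; rerun `python3 _onboarding/scripts/6_detect_overlaps.py` and `python3 _onboarding/scripts/9_build_verification_doc.py` to confirm resolved items drop out."]

def pvLineA (i : Int) (e : String × String × String) : String :=
  "- [ ] **A" ++ PySem.Int.toStr i ++ "** `" ++ e.1 ++ "` × `" ++ e.2.1 ++ "` (" ++ e.2.2 ++ ") — accept fix / reject (note: _______)"

def pvLineB (i : Int) (p : String × Int) : String :=
  "- [ ] **B" ++ PySem.Int.toStr i ++ "** `" ++ p.1 ++ "` (" ++ PySem.Int.toStr p.2 ++ " cells) — SME to supply formulas / accept literals"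

def build_signoff_section_alt (pairs : List (String × String × String × Int)) (rows : List (List (String × String))) : List String :=
  let items := pvSortedItems pairs
  let kv := items.map (fun it => (it.1.2.2, (it.1.1, it.1.2.1)))
  let groups : PySem.Dict String (List (String × String)) :=
    kv.foldl (fun d p => d.modify p.1 [] (· ++ [p.2])) PySem.Dict.empty
  let entries := (["2006-2015", "2016-2019", "2020-2024"]).flatMap
    (fun rng => (groups.getD rng []).map (fun ab => (ab.1, ab.2, rng)))
  let secA := (PySem.List.enumerate entries 1).map (fun p => pvLineA p.1 p.2)
  let counts := PySem.List.sorted2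
    (PySem.Dict.counter (rows.filterMap (fun r => (PySem.Dict.mk r).get? "code"))).items
    (fun p => p.1) (fun p => p.2)
  let secB := (PySem.List.enumerate counts 1).map (fun p => pvLineB p.1 p.2)
  pvHeader ++ secA ++ ["", "### B. Hard-coded overrides", ""] ++ secB ++ pvFooter

-- ===== PRECONDITION & SPEC =====
-- A raises KeyError (r["code"]) on any row missing the key "code"; Pre_ excludes exactly those inputs.
def Pre_build_signoff_section (pairs : List (String × String × String × Int)) (rows : List (List (String × String))) : Prop :=
  rows.all (fun r => r.any (fun kv => kv.1 == "code")) = true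
instance (pairs : List (String × String × String × Int)) (rows : List (List (String × String))) : Decidable (Pre_build_signoff_section pairs rows) := by unfold Pre_build_signoff_section; infer_instance

def pvWitness_build_signoff_section : (List (String × String × String × Int)) × (List (List (String × String))) :=
  ([("Tax", "VAT", "2006-2015", 3)], [[("code", "BOOST-1")]])

def Spec_build_signoff_section (pairs : List (String × String × String × Int)) (rows : List (List (String × String))) (out : List String) : Prop := out = build_signoff_section_alt pairs rows
instance (pairs : List (String × String × String × Int)) (rows : List (List (String × String))) (out : List String) : Decidable (Spec_build_signoff_section pairs rows out) := by unfold Spec_build_signoff_section; infer_instance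

-- ===== CLAIM (what is proved, stated in full; the proofs are below) =====
def Claim_equal_build_signoff_section : Prop := ∀ (pairs : List (String × String × String × Int)) (rows : List (List (String × String))), Dom_build_signoff_section pairs rows → Pre_build_signoff_section pairs rows → Spec_build_signoff_section pairs rows (build_signoff_section pairs rows)

-- ===== LEMMAS AND PROOFS =====

-- A's inner range loop (skip unless the range matches, format and count otherwise) is the
-- plain numbering fold over the filtered, projected entry list.
theorem pv_loopA_eq (rng : String) :
    ∀ (items : List ((String × String × String) × Int)) (st : Int × List String),
      items.foldl (fun st it => if it.1.2.2 ≠ rng then st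
          else (st.1 + 1, st.2 ++ ["- [ ] **A" ++ PySem.Int.toStr (st.1 + 1) ++ "** `" ++ it.1.1 ++ "` × `" ++ it.1.2.1 ++ "` (" ++ rng ++ ") — accept fix / reject (note: _______)"])) st
        = ((items.filter (fun it => it.1.2.2 == rng)).map (fun it => (it.1.1, it.1.2.1, rng))).foldl
            (fun st e => (st.1 + 1, st.2 ++ [pvLineA (st.1 + 1) e])) st := by
  intro items
  induction items with
  | nil => intro st; rfl
  | cons x t ih =>
    intro st
    rw [List.foldl_cons, ih, List.filter_cons]
    by_cases hx : x.1.2.2 = rng <;> simp [hx, pvLineA]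

-- A's counting loop (look the code up, skip rows without one) is the plain counting fold
-- over the list of found codes.
theorem pv_bump_eq :
    ∀ (rows : List (List (String × String))) (d : PySem.Dict String Int),
      rows.foldl pvBumpCode d
        = (rows.filterMap (fun r => (PySem.Dict.mk r).get? "code")).foldl
            (fun d c => d.modify c (0 : Int) (· + 1)) d := by
  intro rows
  induction rows with
  | nil => intro d; rfl
  | cons x t ih =>
    intro d
    cases hx : (PySem.Dict.mk x).get? "code" <;>
      simp [List.foldl, hx, ih, pvBumpCode]

-- A's running-counter numbering fold is the enumerated map.
theorem pv_foldl_number {α : Type} (fmt : Int → α → String) :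
    ∀ (xs : List α) (s : Int) (lines : List String),
      xs.foldl (fun st x => (st.1 + 1, st.2 ++ [fmt (st.1 + 1) x])) (s, lines)
        = (s + xs.length, lines ++ (PySem.List.enumerate xs (s + 1)).map (fun p => fmt p.1 p.2)) := by
  intro xs
  induction xs with
  | nil => intro s lines; simp [PySem.List.enumerate]
  | cons x t ih =>
    intro s lines
    simp [List.foldl, ih, PySem.List.enumerate]
    omega

-- ===== VERDICT (by name: the statement is the Claim_ definition above) =====
theorem build_signoff_section_spec : Claim_equal_build_signoff_section := by
  intro pairs rows _hdom hpre
  unfold Spec_build_signoff_section build_signoff_section build_signoff_section_alt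
  simp only [List.foldl_cons, List.foldl_nil, List.flatMap_cons, List.flatMap_nil, List.append_nil]
  rw [pv_loopA_eq, pv_loopA_eq, pv_loopA_eq]
  rw [← List.foldl_append, ← List.foldl_append]
  rw [pv_foldl_number pvLineA]
  rw [pv_bump_eq, ← PySem.Dict.counter_eq_foldl]
  rw [show (fun (st : Int × List String) (p : String × Int) => (st.1 + 1, st.2 ++ ["- [ ] **B" ++ PySem.Int.toStr (st.1 + 1) ++ "** `" ++ p.1 ++ "` (" ++ PySem.Int.toStr p.2 ++ " cells) — SME to supply formulas / accept literals"])) = (fun st p => (st.1 + 1, st.2 ++ [pvLineB (st.1 + 1) p])) from rfl]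
  rw [pv_foldl_number pvLineB]
  rw [PySem.Dict.getD_foldl_modify_append, PySem.Dict.getD_foldl_modify_append, PySem.Dict.getD_foldl_modify_append]
  simp only [List.filter_map, List.map_map, zero_add]
  simp only [Function.comp_def]
  simp [pvHeader, pvFooter, Function.comp_def]
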